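-- pv_equiv track=rewrite | github.com/Milenski1987/Python-Fundamentals-Course | text_processing/lab/digits_letters_other.py | digits_letters_others
-- ===== SOURCE A (Python) =====
-- def digits_letters_others(current_string: str) -> tuple:
--     digits = ""
--     letters = ""
--     others = ""
--     for character in current_string:
--         if character.isdigit():
--             digits += character
--         elif character.isalpha():
--             letters += character
--         else:
--             others += character
--     return digits, letters, others
-- ===== SOURCE B (Python) =====
-- def digits_letters_others(current_string: str) -> tuple:
--     digits = "".join(c for c in current_string if c.isdigit())
--     letters = "".join(c for c in current_string if c.isalpha() and not c.isdigit())
--     others = "".join(c for c in current_string if not c.isdigit() and not c.isalpha())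
--     return digits, letters, others
-- ===== Notes on version B (the rewrite author's own statement) =====
-- stated objective: idiomatic
-- what changed: Replaces the single stateful if/elif/else loop over three string accumulators with three independent filtered join-comprehensions, one per bucket, with explicit mutually-exclusive predicates.
import Mathlib
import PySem

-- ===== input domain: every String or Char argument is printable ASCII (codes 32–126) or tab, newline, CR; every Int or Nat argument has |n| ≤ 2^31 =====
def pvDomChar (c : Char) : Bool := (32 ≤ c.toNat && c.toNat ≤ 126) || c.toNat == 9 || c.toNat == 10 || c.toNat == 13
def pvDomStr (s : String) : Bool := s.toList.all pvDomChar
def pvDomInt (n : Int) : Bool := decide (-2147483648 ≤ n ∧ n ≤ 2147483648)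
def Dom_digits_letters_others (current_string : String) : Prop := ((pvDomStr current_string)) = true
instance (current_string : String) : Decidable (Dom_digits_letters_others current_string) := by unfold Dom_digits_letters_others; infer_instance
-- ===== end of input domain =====

-- B replaces A's single if/elif/else accumulator loop with three independent filtered join-comprehensions (idiomatic; same cost).


-- ===== PORT A =====
def digits_letters_others (current_string : String) : String × String × String :=
  let r := current_string.toList.foldl
    (fun (acc : List Char × List Char × List Char) character =>
      if PySem.Chars.isdigit character then (acc.1 ++ [character], acc.2.1, acc.2.2)
      else if PySem.Chars.isalpha character then (acc.1, acc.2.1 ++ [character], acc.2.2)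
      else (acc.1, acc.2.1, acc.2.2 ++ [character]))
    ([], [], [])
  (String.ofList r.1, String.ofList r.2.1, String.ofList r.2.2)

-- ===== PORT B =====
def digits_letters_others_alt (current_string : String) : String × String × String :=
  (String.ofList (current_string.toList.filter (fun c => PySem.Chars.isdigit c)),
   String.ofList (current_string.toList.filter (fun c => PySem.Chars.isalpha c && !PySem.Chars.isdigit c)),
   String.ofList (current_string.toList.filter (fun c => !PySem.Chars.isdigit c && !PySem.Chars.isalpha c)))

-- ===== PRECONDITION & SPEC =====
def Spec_digits_letters_others (current_string : String) (out : String × String × String) : Prop := out = digits_letters_others_alt current_string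
instance (current_string : String) (out : String × String × String) : Decidable (Spec_digits_letters_others current_string out) := by unfold Spec_digits_letters_others; infer_instance

-- ===== CLAIM (what is proved, stated in full; the proofs are below) =====
def Claim_equal_digits_letters_others : Prop := ∀ (current_string : String), Dom_digits_letters_others current_string → Spec_digits_letters_others current_string (digits_letters_others current_string)

-- ===== LEMMAS AND PROOFS =====
lemma dlo_foldl (cs : List Char) (d l o : List Char) :
    cs.foldl
      (fun (acc : List Char × List Char × List Char) character =>
        if PySem.Chars.isdigit character then (acc.1 ++ [character], acc.2.1, acc.2.2)
        else if PySem.Chars.isalpha character then (acc.1, acc.2.1 ++ [character], acc.2.2)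
        else (acc.1, acc.2.1, acc.2.2 ++ [character]))
      (d, l, o)
    = (d ++ cs.filter (fun c => PySem.Chars.isdigit c),
       l ++ cs.filter (fun c => PySem.Chars.isalpha c && !PySem.Chars.isdigit c),
       o ++ cs.filter (fun c => !PySem.Chars.isdigit c && !PySem.Chars.isalpha c)) := by
  induction cs generalizing d l o with
  | nil => simp
  | cons c cs ih =>
    by_cases hd : PySem.Chars.isdigit c <;> by_cases ha : PySem.Chars.isalpha c <;>
      simp [List.foldl_cons, hd, ha, ih]


-- ===== VERDICT (by name: the statement is the Claim_ definition above) =====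
theorem digits_letters_others_spec : Claim_equal_digits_letters_others := by
  intro s _
  unfold Spec_digits_letters_others digits_letters_others digits_letters_others_alt
  simp [dlo_foldl]
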